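-- pv_equiv track=rewrite | github.com/eliottcassidy2000/math | 04-computation/W_ihalf_analysis.py | poly_divide_by_u2_plus_1
-- ===== SOURCE A (Python) =====
-- def poly_divide_by_u2_plus_1(coeffs):
--     """
--     Divide polynomial in u by (u^2 + 1). Return quotient and remainder.
--     coeffs = [a_0, a_1, ..., a_d]
--     """
--     d = len(coeffs) - 1
--     if d < 2:
--         return [0], coeffs[:]
--
--     # Synthetic division by u^2 + 1
--     q = [0] * (d - 1)
--     r = coeffs[:]
--
--     for i in range(d, 1, -1):
--         q[i-2] = r[i]
--         r[i] = 0
--         r[i-2] -= q[i-2]  # subtract q[i-2] * 1 from r[i-2]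
--
--     remainder = r[:2]
--     return q, remainder
-- ===== SOURCE B (Python) =====
-- def poly_divide_by_u2_plus_1(coeffs):
--     """
--     Divide polynomial in u by (u^2 + 1). Return quotient and remainder.
--     coeffs = [a_0, a_1, ..., a_d]
--     """
--     d = len(coeffs) - 1
--     if d < 2:
--         return [0], coeffs[:]
--
--     # Closed form: since u^2 = -1 modulo the divisor, the k-th synthetic value is
--     # S[k] = sum_{i >= k, i = k (mod 2)} (-1)^((i-k)/2) * coeffs[i];
--     # then quotient = S[2:], remainder = [S[0], S[1]].
--     # Compute S via per-parity prefix sums of the sign-adjusted coefficients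
--     # b_i = (-1)**(i//2) * coeffs[i] (sign pattern + + - - repeating):
--     # S[k] = (-1)**(k//2) * (class_total - prefix_below_k).
--     b = [a if i % 4 < 2 else -a for i, a in enumerate(coeffs)]
--     pre = []
--     even_tot = 0
--     odd_tot = 0
--     for i, x in enumerate(b):
--         if i % 2 == 0:
--             pre.append(even_tot)
--             even_tot += x
--         else:
--             pre.append(odd_tot)
--             odd_tot += x
--     S = [((even_tot if k % 2 == 0 else odd_tot) - pre[k]) * (1 if k % 4 < 2 else -1)
--          for k in range(d + 1)]
--     return S[2:], S[:2]
-- ===== Notes on version B (the rewrite author's own statement) =====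
-- stated objective: alternative
-- what changed: B replaces A's backward in-place synthetic division by a closed form: since u^2 = -1 modulo the divisor, each synthetic value S[k] is an alternating suffix sum per parity class, computed with a single FORWARD pass of per-parity prefix sums over sign-adjusted coefficients; quotient and remainder are read off S.
import Mathlib
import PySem

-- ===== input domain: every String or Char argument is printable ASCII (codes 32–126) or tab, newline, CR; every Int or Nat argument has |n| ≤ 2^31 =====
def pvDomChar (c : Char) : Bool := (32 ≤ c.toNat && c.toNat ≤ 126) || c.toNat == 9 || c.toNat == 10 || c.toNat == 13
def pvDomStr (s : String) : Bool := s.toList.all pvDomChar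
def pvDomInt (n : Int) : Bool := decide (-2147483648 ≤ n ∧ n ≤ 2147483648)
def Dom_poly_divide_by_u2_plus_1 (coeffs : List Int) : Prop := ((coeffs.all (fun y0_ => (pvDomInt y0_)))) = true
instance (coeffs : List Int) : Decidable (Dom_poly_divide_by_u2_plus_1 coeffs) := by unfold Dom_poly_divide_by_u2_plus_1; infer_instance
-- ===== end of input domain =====

-- B replaces A's backward in-place synthetic division by a closed form: modulo u^2+1 each
-- synthetic value S[k] is an alternating per-parity suffix sum, computed by one FORWARD pass
-- of per-parity prefix sums over sign-adjusted coefficients; quotient/remainder are read off S.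

-- ===== PORT A =====
-- loop body of A's 'for i in range(d, 1, -1)' over the state (q, r)
def pvStepA (st : List Int × List Int) (i : Int) : List Int × List Int :=
  let v := PySem.List.pyGetD st.2 i 0            -- q[i-2] = r[i]
  let q := PySem.List.pySetD st.1 (i - 2) v
  let r := PySem.List.pySetD st.2 i 0            -- r[i] = 0
  let r := PySem.List.pySetD r (i - 2) (PySem.List.pyGetD r (i - 2) 0 - v)  -- r[i-2] -= q[i-2]
  (q, r)

def poly_divide_by_u2_plus_1 (coeffs : List Int) : List Int × List Int :=
  let d : Int := (coeffs.length : Int) - 1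
  if d < 2 then ([0], PySem.List.slice coeffs none none)   -- coeffs[:]
  else
    let q0 : List Int := List.replicate (d - 1).toNat 0    -- [0] * (d - 1)
    let r0 : List Int := PySem.List.slice coeffs none none -- coeffs[:]
    let st := (PySem.List.pyRange d 1 (-1)).foldl pvStepA (q0, r0)
    (st.1, PySem.List.slice st.2 none (some 2))            -- remainder = r[:2]

-- ===== PORT B =====
-- loop body of B's 'for i, x in enumerate(b)' over the state (even_tot, odd_tot, pre)
-- (the enumerate index i is nonnegative, so Int.emod '%' agrees with Python's '%')
def pvStepB (st : Int × Int × List Int) (p : Int × Int) : Int × Int × List Int :=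
  if p.1 % 2 == 0 then (st.1 + p.2, st.2.1, st.2.2 ++ [st.1])
  else (st.1, st.2.1 + p.2, st.2.2 ++ [st.2.1])

def poly_divide_by_u2_plus_1_alt (coeffs : List Int) : List Int × List Int :=
  let d : Int := (coeffs.length : Int) - 1
  if d < 2 then ([0], PySem.List.slice coeffs none none)   -- coeffs[:]
  else
    -- b = [a if i % 4 < 2 else -a for i, a in enumerate(coeffs)]
    let b := (PySem.List.enumerate coeffs 0).map (fun p => if p.1 % 4 < 2 then p.2 else -p.2)
    -- forward prefix-sum pass
    let st := (PySem.List.enumerate b 0).foldl pvStepB (0, 0, [])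
    -- S = [((even_tot if k%2==0 else odd_tot) - pre[k]) * (1 if k%4<2 else -1) for k in range(d+1)]
    let S := (PySem.List.pyRange 0 (d + 1) 1).map (fun k =>
      ((if k % 2 == 0 then st.1 else st.2.1) - PySem.List.pyGetD st.2.2 k 0) *
        (if k % 4 < 2 then 1 else -1))
    (PySem.List.slice S (some 2) none, PySem.List.slice S none (some 2))   -- S[2:], S[:2]

-- ===== PRECONDITION & SPEC =====
def Spec_poly_divide_by_u2_plus_1 (coeffs : List Int) (out : List Int × List Int) : Prop := out = poly_divide_by_u2_plus_1_alt coeffs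
instance (coeffs : List Int) (out : List Int × List Int) : Decidable (Spec_poly_divide_by_u2_plus_1 coeffs out) := by unfold Spec_poly_divide_by_u2_plus_1; infer_instance

-- ===== CLAIM (what is proved, stated in full; the proofs are below) =====
def Claim_equal_poly_divide_by_u2_plus_1 : Prop := ∀ (coeffs : List Int), Dom_poly_divide_by_u2_plus_1 coeffs → Spec_poly_divide_by_u2_plus_1 coeffs (poly_divide_by_u2_plus_1 coeffs)

-- ===== LEMMAS AND PROOFS =====

-- the quotient list [q_{dd-1-n}, ..., q_{dd-2}] of length n, built by q[k] = c[k+2] - q[k+2]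
def pvBq (c : List Int) (dd : Nat) : Nat → List Int
  | 0 => []
  | n + 1 => (c.getD (dd - n) 0 - (pvBq c dd n).getD 1 0) :: pvBq c dd n

theorem pvBq_length (c : List Int) (dd n : Nat) : (pvBq c dd n).length = n := by
  induction n with
  | zero => rfl
  | succ n ih => simp [pvBq, ih]

-- A's loop state after having processed i = dd, dd-1, ..., m+1  (m from dd down to 1)
def pvSq (c : List Int) (dd m : Nat) : List Int :=
  List.replicate (m - 1) 0 ++ pvBq c dd (dd - m)

def pvSr (c : List Int) (dd m : Nat) : List Int :=
  c.take (m - 1) ++ ([c.getD (m - 1) 0 - (pvBq c dd (dd - m)).getD 0 0,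
                      c.getD m 0 - (pvBq c dd (dd - m)).getD 1 0] ++ List.replicate (dd - m) 0)

theorem pvStepA_S (c : List Int) (dd m : Nat) (hlen : c.length = dd + 1) (hm : 2 ≤ m) (hmd : m ≤ dd) :
    pvStepA (pvSq c dd m, pvSr c dd m) (m : Int) = (pvSq c dd (m - 1), pvSr c dd (m - 1)) := by
  have hQl : (pvBq c dd (dd - m)).length = dd - m := pvBq_length c dd (dd - m)
  have htl : (c.take (m - 1)).length = m - 1 := by simp; omega
  have hm2 : ((m : Int) - 2) = ((m - 2 : Nat) : Int) := by omega
  have hbq : pvBq c dd (dd - (m - 1)) = (c.getD m 0 - (pvBq c dd (dd - m)).getD 1 0) :: pvBq c dd (dd - m) := by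
    have h1 : dd - (m - 1) = (dd - m) + 1 := by omega
    have h2 : dd - (dd - m) = m := by omega
    rw [h1, pvBq, h2]
  -- value read: v = r[m]
  have hV : (pvSr c dd m).getD m 0 = c.getD m 0 - (pvBq c dd (dd - m)).getD 1 0 := by
    rw [pvSr, List.getD_append_right _ _ _ _ (by omega), htl,
        List.getD_append _ _ _ _ (by simp; omega)]
    have : m - (m - 1) = 1 := by omega
    rw [this]
    rfl
  -- quotient update: q.set (m-2) v
  have hq : (pvSq c dd m).set (m - 2) ((pvSr c dd m).getD m 0) = pvSq c dd (m - 1) := by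
    rw [hV, pvSq, List.set_append, if_pos (by simp; omega)]
    have hrep : List.replicate (m - 1) (0 : Int) = List.replicate (m - 2) 0 ++ [0] := by
      have : m - 1 = (m - 2) + 1 := by omega
      rw [this, List.replicate_succ']
    rw [hrep, List.set_append, if_neg (by simp), List.length_replicate, Nat.sub_self]
    show ((List.replicate (m - 2) (0 : Int) ++ [_]) ++ _) = _
    rw [pvSq, List.append_assoc]
    have : m - 1 - 1 = m - 2 := by omega
    rw [this, hbq]
    rfl
  -- remainder after r[m] := 0
  have hr1 : (pvSr c dd m).set m 0 =
      c.take (m - 1) ++ ([c.getD (m - 1) 0 - (pvBq c dd (dd - m)).getD 0 0, 0] ++ List.replicate (dd - m) 0) := by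
    rw [pvSr, List.set_append, if_neg (by omega), htl]
    have : m - (m - 1) = 1 := by omega
    rw [this, List.set_append, if_pos (by simp)]
    rfl
  have hget2 : ((pvSr c dd m).set m 0).getD (m - 2) 0 = c.getD (m - 2) 0 := by
    rw [hr1, List.getD_append _ _ _ _ (by omega), List.getD_eq_getElem _ _ (by omega),
        List.getElem_take, List.getD_eq_getElem _ _ (by omega)]
  have hr : ((pvSr c dd m).set m 0).set (m - 2) (((pvSr c dd m).set m 0).getD (m - 2) 0 - (pvSr c dd m).getD m 0)
      = pvSr c dd (m - 1) := by
    rw [hget2, hV, hr1, List.set_append, if_pos (by omega)]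
    have htk : c.take (m - 1) = c.take (m - 2) ++ [c.getD (m - 2) 0] := by
      have h1 : m - 1 = (m - 2) + 1 := by omega
      rw [h1, List.take_add_one]
      congr 1
      rw [List.getElem?_eq_getElem (show m - 2 < c.length by omega),
          List.getD_eq_getElem _ _ (show m - 2 < c.length by omega)]
      rfl
    rw [htk, List.set_append, if_neg (by simp), List.length_take]
    have : m - 2 - min (m - 2) c.length = 0 := by omega
    rw [this]
    show (c.take (m - 2) ++ [_]) ++ _ = _
    rw [pvSr, List.append_assoc]
    have h11 : m - 1 - 1 = m - 2 := by omega
    have hrep : (0 : Int) :: List.replicate (dd - m) 0 = List.replicate (dd - (m - 1)) 0 := by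
      have : dd - (m - 1) = (dd - m) + 1 := by omega
      rw [this, List.replicate_succ]
    rw [h11, hbq]
    simp [← hrep]
  unfold pvStepA
  simp only [hm2, PySem.List.pyGetD_natCast, PySem.List.pySetD_natCast]
  rw [hq, hr]

theorem pvA_fold (c : List Int) (dd : Nat) (hlen : c.length = dd + 1) : ∀ m : Nat, 1 ≤ m → m ≤ dd →
    (PySem.List.pyRange (m : Int) 1 (-1)).foldl pvStepA (pvSq c dd m, pvSr c dd m)
      = (pvSq c dd 1, pvSr c dd 1) := by
  intro m
  induction m with
  | zero => intro h; omega
  | succ m ih =>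
    intro _ hmd
    by_cases hm1 : m = 0
    · subst hm1
      rw [PySem.List.pyRange_neg_one_eq_nil (by norm_num)]
      simp
    · have hcons : PySem.List.pyRange ((m : Int) + 1) 1 (-1) = ((m : Int) + 1) :: PySem.List.pyRange ((m : Int) + 1 - 1) 1 (-1) :=
        PySem.List.pyRange_neg_one_cons (by omega)
      have h11 : (m : Int) + 1 - 1 = (m : Int) := by ring
      rw [h11] at hcons
      have hstep := pvStepA_S c dd (m + 1) hlen (by omega) (by omega)
      simp only [Nat.add_sub_cancel] at hstep
      push_cast
      rw [hcons]
      simp only [List.foldl_cons]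
      have hc : ((m : Int) + 1) = (((m + 1 : Nat)) : Int) := by push_cast; ring
      rw [hc, hstep]
      exact ih (by omega) (by omega)

theorem pvSplit (c : List Int) (dd : Nat) (hlen : c.length = dd + 1) (hdd2 : 2 ≤ dd) :
    c = c.take (dd - 1) ++ ([c.getD (dd - 1) 0, c.getD dd 0] ++ []) := by
  have h1 : dd - 1 < c.length := by omega
  have h2 : dd < c.length := by omega
  rw [List.getD_eq_getElem _ _ h1, List.getD_eq_getElem _ _ h2]
  conv_lhs => rw [← List.take_append_drop (dd - 1) c]
  congr 1
  rw [List.drop_eq_getElem_cons h1]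
  have h3 : dd - 1 + 1 = dd := by omega
  rw [h3, List.drop_eq_getElem_cons h2, List.drop_eq_nil_of_le (by omega)]
  simp

-- ---------- B-side mathematics ----------

def pvSgn (k : Nat) : Int := if k % 4 < 2 then 1 else -1

theorem pvSgn_mul_self (k : Nat) : pvSgn k * pvSgn k = 1 := by
  unfold pvSgn; split_ifs <;> norm_num

theorem pvSgn_add_two (k : Nat) : pvSgn (k + 2) = -pvSgn k := by
  unfold pvSgn; split_ifs <;> omega

-- the sign-adjusted coefficient list  b_i = (-1)^(i//2) * c_i
def pvB (c : List Int) : List Int :=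
  (PySem.List.enumerate c 0).map (fun p => if p.1 % 4 < 2 then p.2 else -p.2)

theorem pvB_length (c : List Int) : (pvB c).length = c.length := by
  simp [pvB, PySem.List.length_enumerate]

theorem pvB_getD (c : List Int) (k : Nat) : (pvB c).getD k 0 = pvSgn k * c.getD k 0 := by
  by_cases h : k < c.length
  · rw [List.getD_eq_getElem _ _ (by rw [pvB_length]; omega), List.getD_eq_getElem _ _ h]
    simp only [pvB, List.getElem_map, PySem.List.getElem_enumerate, pvSgn]
    split_ifs with h1 h2
    · ring
    · exfalso; omega
    · exfalso; omega
    · ring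
  · rw [List.getD_eq_default _ _ (by rw [pvB_length]; omega), List.getD_eq_default _ _ (by omega)]
    simp

-- per-parity suffix sum of b starting at k
def pvSuf (b : List Int) (k : Nat) : Int :=
  if k < b.length then b.getD k 0 + pvSuf b (k + 2) else 0
termination_by b.length - k
decreasing_by omega

-- the synthetic value S[k] = (-1)^(k//2) * (per-parity suffix sum of b from k)
def pvS (c : List Int) (k : Nat) : Int := pvSgn k * pvSuf (pvB c) k

theorem pvS_zero (c : List Int) (k : Nat) (h : c.length ≤ k) : pvS c k = 0 := by
  unfold pvS
  rw [pvSuf, if_neg (by rw [pvB_length]; omega), mul_zero]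

theorem pvS_rec (c : List Int) (k : Nat) (h : k < c.length) :
    pvS c k = c.getD k 0 - pvS c (k + 2) := by
  unfold pvS
  rw [pvSuf, if_pos (by rw [pvB_length]; omega), pvB_getD, pvSgn_add_two]
  calc pvSgn k * (pvSgn k * c.getD k 0 + pvSuf (pvB c) (k + 2))
      = (pvSgn k * pvSgn k) * c.getD k 0 + pvSgn k * pvSuf (pvB c) (k + 2) := by ring
    _ = c.getD k 0 + pvSgn k * pvSuf (pvB c) (k + 2) := by rw [pvSgn_mul_self, one_mul]
    _ = c.getD k 0 - -pvSgn k * pvSuf (pvB c) (k + 2) := by ring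

-- prefix sum of b below k within parity class p
def pvPfun (b : List Int) (p k : Nat) : Int :=
  ∑ i ∈ Finset.range k, if i % 2 = p then b.getD i 0 else 0

theorem pvPfun_succ (b : List Int) (p k : Nat) :
    pvPfun b p (k + 1) = pvPfun b p k + (if k % 2 = p then b.getD k 0 else 0) := by
  unfold pvPfun; rw [Finset.sum_range_succ]

theorem pvPfun_ge (b : List Int) (p : Nat) : ∀ k, b.length ≤ k → pvPfun b p k = pvPfun b p b.length := by
  intro k
  induction k with
  | zero => intro h; rw [Nat.le_zero.mp h]
  | succ k ih =>
    intro h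
    by_cases hk : b.length ≤ k
    · rw [pvPfun_succ, List.getD_eq_default _ _ hk, ih hk]
      simp
    · have : b.length = k + 1 := by omega
      rw [this]

theorem pvSuf_eq (b : List Int) (k : Nat) :
    pvSuf b k = pvPfun b (k % 2) b.length - pvPfun b (k % 2) k := by
  have H : ∀ m k, b.length - k ≤ m → pvSuf b k = pvPfun b (k % 2) b.length - pvPfun b (k % 2) k := by
    intro m
    induction m with
    | zero =>
      intro k hk
      rw [pvSuf, if_neg (by omega), pvPfun_ge b _ k (by omega)]
      ring
    | succ m ih =>
      intro k hk
      by_cases h : k < b.length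
      · rw [pvSuf, if_pos h]
        have hp : (k + 2) % 2 = k % 2 := Nat.add_mod_right k 2
        have h2 : pvPfun b (k % 2) (k + 2) = pvPfun b (k % 2) k + b.getD k 0 := by
          rw [pvPfun_succ, pvPfun_succ, if_pos rfl, if_neg (by omega)]
          ring
        rw [ih (k + 2) (by omega), hp, h2]
        ring
      · rw [pvSuf, if_neg h, pvPfun_ge b _ k (by omega)]
        ring
  exact H (b.length - k) k le_rfl

-- the quotient recurrence list is a window of the closed-form S values
theorem pvBq_eq_map (c : List Int) (dd : Nat) (hlen : c.length = dd + 1) :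
    ∀ n, n ≤ dd - 1 →
      pvBq c dd n = (List.range n).map (fun j => pvS c (dd + 1 - n + j)) := by
  intro n
  induction n with
  | zero => intro _; rfl
  | succ n ih =>
    intro hn
    have ihn := ih (by omega)
    have hgetD1 : (pvBq c dd n).getD 1 0 = pvS c (dd + 2 - n) := by
      by_cases h2 : 2 ≤ n
      · rw [ihn, List.getD_eq_getElem _ _ (by simp; omega), List.getElem_map,
            List.getElem_range]
        congr 1
        omega
      · rw [List.getD_eq_default _ _ (by rw [pvBq_length]; omega)]
        rw [pvS_zero c _ (by omega)]
    have hhead : c.getD (dd - n) 0 - (pvBq c dd n).getD 1 0 = pvS c (dd - n) := by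
      rw [hgetD1, pvS_rec c (dd - n) (by omega)]
      congr 2
      omega
    rw [pvBq, hhead, ihn, List.range_succ_eq_map, List.map_cons, List.map_map]
    congr 1
    · congr 1; omega
    · apply List.map_congr_left
      intro j hj
      simp only [Function.comp_apply]
      congr 1
      omega

-- B's forward prefix-sum fold, characterised on every prefix of the enumeration
theorem pvB_fold_take (b : List Int) : ∀ k, k ≤ b.length →
    ((PySem.List.enumerate b 0).take k).foldl pvStepB (0, 0, []) =
      (pvPfun b 0 k, pvPfun b 1 k, (List.range k).map (fun i => pvPfun b (i % 2) i)) := by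
  intro k
  induction k with
  | zero => intro _; simp [pvPfun]
  | succ k ih =>
    intro hk
    have hlen : k < (PySem.List.enumerate b 0).length := by
      rw [PySem.List.length_enumerate]; omega
    have htake : (PySem.List.enumerate b 0).take (k + 1)
        = (PySem.List.enumerate b 0).take k ++ [(PySem.List.enumerate b 0)[k]] := by
      rw [List.take_add_one, List.getElem?_eq_getElem hlen]
      rfl
    have hget : (PySem.List.enumerate b 0)[k] = ((k : Int), b[k]) := by
      rw [PySem.List.getElem_enumerate]
      congr 1
      omega
    rw [htake, hget, List.foldl_append, ih (by omega), List.foldl_cons, List.foldl_nil]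
    have hb : b[k] = b.getD k 0 := (List.getD_eq_getElem b 0 (by omega)).symm
    by_cases hpar : k % 2 = 0
    · rw [pvStepB, if_pos (by simp; omega)]
      rw [pvPfun_succ, pvPfun_succ, if_pos hpar, if_neg (by omega), add_zero,
          List.range_succ, List.map_append, List.map_singleton, hpar, hb]
    · rw [pvStepB, if_neg (by simp; omega)]
      have hpar1 : k % 2 = 1 := by omega
      rw [pvPfun_succ, pvPfun_succ, if_pos hpar1, if_neg (by omega), add_zero,
          List.range_succ, List.map_append, List.map_singleton, hpar1, hb]

theorem pvB_fold (b : List Int) :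
    (PySem.List.enumerate b 0).foldl pvStepB (0, 0, []) =
      (pvPfun b 0 b.length, pvPfun b 1 b.length,
       (List.range b.length).map (fun i => pvPfun b (i % 2) i)) := by
  have h := pvB_fold_take b b.length le_rfl
  rwa [List.take_of_length_le (by rw [PySem.List.length_enumerate])] at h

-- each entry of B's comprehension is the closed-form synthetic value pvS
theorem pvB_entry (c : List Int) (j : Nat) (hj : j < c.length) :
    ((if ((j : Int)) % 2 == 0 then pvPfun (pvB c) 0 (pvB c).length else pvPfun (pvB c) 1 (pvB c).length)
      - PySem.List.pyGetD ((List.range (pvB c).length).map (fun i => pvPfun (pvB c) (i % 2) i)) ((j : Int)) 0)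
      * (if ((j : Int)) % 4 < 2 then 1 else -1) = pvS c j := by
  have hjb : j < (pvB c).length := by rw [pvB_length]; omega
  have hpre : PySem.List.pyGetD ((List.range (pvB c).length).map (fun i => pvPfun (pvB c) (i % 2) i)) ((j : Int)) 0
      = pvPfun (pvB c) (j % 2) j := by
    rw [PySem.List.pyGetD_natCast, List.getD_eq_getElem _ _ (by simp; omega),
        List.getElem_map, List.getElem_range]
  rw [hpre]
  have htot : (if ((j : Int)) % 2 == 0 then pvPfun (pvB c) 0 (pvB c).length else pvPfun (pvB c) 1 (pvB c).length)
      = pvPfun (pvB c) (j % 2) (pvB c).length := by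
    by_cases hp : j % 2 = 0
    · rw [if_pos (by simp; omega), hp]
    · rw [if_neg (by simp; omega)]
      have : j % 2 = 1 := by omega
      rw [this]
  rw [htot]
  have hsuf := pvSuf_eq (pvB c) j
  have hsgn : (if ((j : Int)) % 4 < 2 then (1 : Int) else -1) = pvSgn j := by
    unfold pvSgn; split_ifs <;> omega
  rw [hsgn, ← hsuf, pvS, mul_comm]

-- ===== VERDICT (by name: the statement is the Claim_ definition above) =====
theorem poly_divide_by_u2_plus_1_spec : Claim_equal_poly_divide_by_u2_plus_1 := by
  intro c _
  unfold Spec_poly_divide_by_u2_plus_1 poly_divide_by_u2_plus_1 poly_divide_by_u2_plus_1_alt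
  by_cases hlt : ((c.length : Int) - 1) < 2
  · rw [if_pos hlt, if_pos hlt]
  · rw [if_neg hlt, if_neg hlt]
    have hdd2 : 2 ≤ c.length - 1 := by omega
    set dd := c.length - 1 with hdd
    have hlen : c.length = dd + 1 := by omega
    have hdint : (c.length : Int) - 1 = ((dd : Nat) : Int) := by omega
    have htn : (((dd : Nat) : Int) - 1).toNat = dd - 1 := by omega
    simp only [hdint, htn, PySem.List.slice_none_none]
    -- A side: the fold
    have hinit : (List.replicate (dd - 1) (0 : Int), c) = (pvSq c dd dd, pvSr c dd dd) := by
      refine Prod.ext ?_ ?_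
      · simp [pvSq, pvBq]
      · have := pvSplit c dd hlen hdd2
        simp only [pvSr, Nat.sub_self, pvBq]
        simpa using this
    rw [hinit, pvA_fold c dd hlen dd (by omega) (le_refl _)]
    -- B side: fold characterisation and closed-form entries
    rw [show (PySem.List.enumerate c 0).map (fun p => if p.1 % 4 < 2 then p.2 else -p.2) = pvB c from rfl]
    rw [pvB_fold (pvB c)]
    have hS : (PySem.List.pyRange 0 (((dd : Nat) : Int) + 1) 1).map (fun k =>
        ((if k % 2 == 0 then pvPfun (pvB c) 0 (pvB c).length else pvPfun (pvB c) 1 (pvB c).length)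
          - PySem.List.pyGetD ((List.range (pvB c).length).map (fun i => pvPfun (pvB c) (i % 2) i)) k 0)
          * (if k % 4 < 2 then 1 else -1)) = (List.range (dd + 1)).map (fun j => pvS c j) := by
      have hcast : ((dd : Nat) : Int) + 1 = (((dd + 1 : Nat)) : Int) := by push_cast; ring
      rw [hcast, PySem.List.pyRange_zero_natCast, List.map_map]
      apply List.map_congr_left
      intro j hj
      simp only [Function.comp_apply]
      exact pvB_entry c j (by rw [hlen]; exact List.mem_range.mp hj)
    rw [hS]
    -- quotient and remainder from the S list
    have hrange : List.range (dd + 1) = List.range 2 ++ (List.range (dd - 1)).map (2 + ·) := by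
      have : dd + 1 = 2 + (dd - 1) := by omega
      rw [this, List.range_add]
    have hqB : PySem.List.slice ((List.range (dd + 1)).map (fun j => pvS c j)) (some 2) none
        = (List.range (dd - 1)).map (fun j => pvS c (2 + j)) := by
      rw [show (2 : Int) = ((2 : Nat) : Int) from rfl, PySem.List.slice_from_natCast,
          hrange, List.map_append, List.drop_left' (by simp)]
      simp [List.map_map, Function.comp_def]
    have hrB : PySem.List.slice ((List.range (dd + 1)).map (fun j => pvS c j)) none (some 2)
        = [pvS c 0, pvS c 1] := by
      rw [show (2 : Int) = ((2 : Nat) : Int) from rfl, PySem.List.slice_to_natCast,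
          hrange, List.map_append, List.take_append_of_le_length (by simp)]
      simp [List.range_succ]
    rw [hqB, hrB]
    -- and from A's final state
    have hbq : pvBq c dd (dd - 1) = (List.range (dd - 1)).map (fun j => pvS c (2 + j)) := by
      rw [pvBq_eq_map c dd hlen (dd - 1) le_rfl]
      apply List.map_congr_left
      intro j hj
      congr 1
      omega
    have hq0 : (pvBq c dd (dd - 1)).getD 0 0 = pvS c 2 := by
      rw [hbq, List.getD_eq_getElem _ _ (by simp; omega), List.getElem_map, List.getElem_range]
    have hq1 : (pvBq c dd (dd - 1)).getD 1 0 = pvS c 3 := by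
      by_cases h3 : 2 ≤ dd - 1
      · rw [hbq, List.getD_eq_getElem _ _ (by simp; omega), List.getElem_map, List.getElem_range]
      · rw [List.getD_eq_default _ _ (by rw [pvBq_length]; omega), pvS_zero c 3 (by omega)]
    have hsq1 : pvSq c dd 1 = pvBq c dd (dd - 1) := by simp [pvSq]
    have hsr1 : PySem.List.slice (pvSr c dd 1) none (some 2)
        = [c.getD 0 0 - (pvBq c dd (dd - 1)).getD 0 0, c.getD 1 0 - (pvBq c dd (dd - 1)).getD 1 0] := by
      have h2 : PySem.List.slice (pvSr c dd 1) none (some 2) = (pvSr c dd 1).take (2 : Int).toNat :=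
        PySem.List.slice_to _ (by omega)
      rw [h2]
      simp [pvSr]
    rw [hsq1, hsr1, hq0, hq1, hbq,
        show c.getD 0 0 - pvS c 2 = pvS c 0 from by rw [pvS_rec c 0 (by omega)],
        show c.getD 1 0 - pvS c 3 = pvS c 1 from by rw [pvS_rec c 1 (by omega)]]
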